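-- pv_equiv track=rewrite | github.com/EasyStock/Bull | src/Score.py | ToDays
-- ===== SOURCE A (Python) =====
-- def ToDays(tradingDays,params:list):
--     result = []
--     for param in params:
--         start = param.get("startDay",None)
--         end = param.get("endDay",None)
--         if start is None:
--             start = tradingDays[0]
--
--         if end is None:
--             end = tradingDays[-1]
--
--         for tradingDay in tradingDays:
--             if tradingDay >= start and tradingDay <= end:
--                 result.append(tradingDay)
--
--
--     return result
-- ===== SOURCE B (Python) =====
-- def ToDays(tradingDays, params: list):
--     # Resolve every param's (start, end) bounds first.
--     bounds = []
--     for param in params: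
--         start = param.get("startDay")
--         if start is None:
--             start = tradingDays[0]
--         end = param.get("endDay")
--         if end is None:
--             end = tradingDays[-1]
--         bounds.append((start, end))
--     # Single day-major pass: drop each day into the bucket of every param
--     # whose range contains it, then concatenate the buckets param-major.
--     buckets = [[] for _ in bounds]
--     for day in tradingDays:
--         for j, (s, e) in enumerate(bounds):
--             if s <= day <= e:
--                 buckets[j].append(day)
--     result = []
--     for b in buckets:
--         result += b
--     return result
-- ===== Notes on version B (the rewrite author's own statement) =====
-- stated objective: alternative
-- what changed: B replaces A's param-major nested scan (re-scanning tradingDays and appending to one list per param) by a two-phase day-major pass: it resolves all (start,end) bounds first, then walks tradingDays once distributing each day into per-param buckets, and concatenates the buckets.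
import Mathlib
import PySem

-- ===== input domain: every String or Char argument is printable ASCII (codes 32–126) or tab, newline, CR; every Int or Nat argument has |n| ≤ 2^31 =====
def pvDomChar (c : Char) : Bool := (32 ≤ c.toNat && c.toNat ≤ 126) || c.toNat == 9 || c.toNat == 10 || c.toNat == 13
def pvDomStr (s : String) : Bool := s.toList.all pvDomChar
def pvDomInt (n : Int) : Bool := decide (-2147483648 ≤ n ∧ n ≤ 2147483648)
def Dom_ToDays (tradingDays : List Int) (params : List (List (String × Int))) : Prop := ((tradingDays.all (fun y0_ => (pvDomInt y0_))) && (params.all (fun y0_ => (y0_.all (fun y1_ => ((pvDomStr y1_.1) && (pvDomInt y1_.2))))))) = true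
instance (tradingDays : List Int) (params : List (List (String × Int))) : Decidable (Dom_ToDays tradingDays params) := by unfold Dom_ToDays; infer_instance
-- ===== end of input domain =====

-- B resolves all bounds first, then fills per-param buckets in ONE day-major pass and
-- concatenates them, instead of A's param-major re-scans appending to a single list.
-- Same complexity; equivalence of the return value is proved below.

-- ===== PORT A =====
-- param.get(k, None): first match in the association list
def pyDictGet (param : List (String × Int)) (k : String) : Option Int :=
  (param.find? (fun kv => kv.1 == k)).map (·.2)

def ToDays (tradingDays : List Int) (params : List (List (String × Int))) : List Int :=
  params.foldl (fun result param =>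
    let start := match pyDictGet param "startDay" with
      | some v => v
      | none => PySem.List.pyGetD tradingDays 0 0      -- tradingDays[0]; IndexError excluded by Pre_
    let stop := match pyDictGet param "endDay" with
      | some v => v
      | none => PySem.List.pyGetD tradingDays (-1) 0   -- tradingDays[-1]; IndexError excluded by Pre_
    tradingDays.foldl (fun r d => if start ≤ d ∧ d ≤ stop then r ++ [d] else r) result) []

-- ===== PORT B =====
def pvBounds (tradingDays : List Int) (param : List (String × Int)) : Int × Int :=
  let start := match pyDictGet param "startDay" with
    | some v => v
    | none => PySem.List.pyGetD tradingDays 0 0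
  let stop := match pyDictGet param "endDay" with
    | some v => v
    | none => PySem.List.pyGetD tradingDays (-1) 0
  (start, stop)

def ToDays_alt (tradingDays : List Int) (params : List (List (String × Int))) : List Int :=
  let bounds := params.foldl (fun acc param => acc ++ [pvBounds tradingDays param]) []
  let buckets0 : List (List Int) := bounds.map (fun _ => ([] : List Int))
  let buckets := tradingDays.foldl (fun bks day =>
      (bks.zip bounds).map (fun p => if p.2.1 ≤ day ∧ day ≤ p.2.2 then p.1 ++ [day] else p.1))
    buckets0
  buckets.foldl (fun r b => r ++ b) []

-- ===== PRECONDITION & SPEC =====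
-- Pre_ excludes only the inputs where Python A raises IndexError: tradingDays empty while
-- some param lacks a "startDay" or "endDay" key (the [0]/[-1] defaults).
def Pre_ToDays (tradingDays : List Int) (params : List (List (String × Int))) : Prop :=
  tradingDays ≠ [] ∨ ∀ p ∈ params, (pyDictGet p "startDay").isSome ∧ (pyDictGet p "endDay").isSome
instance (tradingDays : List Int) (params : List (List (String × Int))) : Decidable (Pre_ToDays tradingDays params) := by unfold Pre_ToDays; infer_instance

def pvWitness_ToDays : List Int × (List (List (String × Int))) :=
  ([1, 2, 3, 4], [[("startDay", 2)], [("endDay", 3)], []])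

def Spec_ToDays (tradingDays : List Int) (params : List (List (String × Int))) (out : List Int) : Prop := out = ToDays_alt tradingDays params
instance (tradingDays : List Int) (params : List (List (String × Int))) (out : List Int) : Decidable (Spec_ToDays tradingDays params out) := by unfold Spec_ToDays; infer_instance

-- ===== CLAIM (what is proved, stated in full; the proofs are below) =====
def Claim_equal_ToDays : Prop := ∀ (tradingDays : List Int) (params : List (List (String × Int))), Dom_ToDays tradingDays params → Pre_ToDays tradingDays params → Spec_ToDays tradingDays params (ToDays tradingDays params)

-- ===== LEMMAS AND PROOFS =====

-- the per-param filter both programs compute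
def pvFilt (tradingDays : List Int) (b : Int × Int) : List Int :=
  tradingDays.filter (fun d => decide (b.1 ≤ d ∧ d ≤ b.2))

-- A equals the flatMap of per-param filters
lemma ToDays_eq_flatMap (tradingDays : List Int) (params : List (List (String × Int))) :
    ToDays tradingDays params = params.flatMap (fun p => pvFilt tradingDays (pvBounds tradingDays p)) := by
  unfold ToDays
  have h : ∀ (ps : List (List (String × Int))) (acc : List Int),
      ps.foldl (fun result param =>
        let start := match pyDictGet param "startDay" with
          | some v => v | none => PySem.List.pyGetD tradingDays 0 0
        let stop := match pyDictGet param "endDay" with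
          | some v => v | none => PySem.List.pyGetD tradingDays (-1) 0
        tradingDays.foldl (fun r d => if start ≤ d ∧ d ≤ stop then r ++ [d] else r) result) acc
      = acc ++ ps.flatMap (fun p => pvFilt tradingDays (pvBounds tradingDays p)) := by
    intro ps
    induction ps with
    | nil => simp
    | cons p ps ih =>
      intro acc
      simp only [List.foldl_cons, ih, List.flatMap_cons]
      rw [PySem.List.foldl_append_ite_eq_filter]
      simp [pvFilt, pvBounds]
  exact h params []

-- zip of a mapped-over-zip list with the same right list
lemma zip_map_zip {α β γ : Type} (xs : List α) (ys : List β) (f : α × β → γ)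
    (h : xs.length = ys.length) :
    ((xs.zip ys).map f).zip ys = (xs.zip ys).map (fun p => (f p, p.2)) := by
  induction xs generalizing ys with
  | nil => simp
  | cons x xs ih =>
    cases ys with
    | nil => simp at h
    | cons y ys => simp_all

-- the day-major loop on the zipped state
def pvStep' (zl : List (List Int × (Int × Int))) (day : Int) : List (List Int × (Int × Int)) :=
  zl.map (fun p => (if p.2.1 ≤ day ∧ day ≤ p.2.2 then p.1 ++ [day] else p.1, p.2))

lemma foldl_step'_eq (tradingDays : List Int) :
    ∀ zl : List (List Int × (Int × Int)),
      tradingDays.foldl pvStep' zl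
        = zl.map (fun p => (p.1 ++ pvFilt tradingDays p.2, p.2)) := by
  induction tradingDays with
  | nil => intro zl; simp [pvFilt]
  | cons day td ih =>
    intro zl
    simp only [List.foldl_cons, ih, pvStep', List.map_map]
    apply List.map_congr_left
    intro p _
    simp only [Function.comp_apply, pvFilt, List.filter_cons]
    split_ifs with h1 <;> simp_all

-- bridge: the B loop on (buckets, bounds) tracked separately equals the zipped loop
lemma foldl_zip_bridge (tradingDays : List Int) (bounds : List (Int × Int)) :
    ∀ bks : List (List Int), bks.length = bounds.length →
      (tradingDays.foldl (fun bks day =>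
        (bks.zip bounds).map (fun p => if p.2.1 ≤ day ∧ day ≤ p.2.2 then p.1 ++ [day] else p.1)) bks).zip bounds
      = tradingDays.foldl pvStep' (bks.zip bounds) := by
  induction tradingDays with
  | nil => intro bks _; rfl
  | cons day td ih =>
    intro bks hlen
    simp only [List.foldl_cons]
    rw [ih _ (by simp [hlen]), pvStep',
      zip_map_zip _ _ _ hlen]

lemma foldl_len (tradingDays : List Int) (bounds : List (Int × Int)) :
    ∀ bks : List (List Int), bks.length = bounds.length →
      (tradingDays.foldl (fun bks day =>
        (bks.zip bounds).map (fun p => if p.2.1 ≤ day ∧ day ≤ p.2.2 then p.1 ++ [day] else p.1)) bks).length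
      = bounds.length := by
  induction tradingDays with
  | nil => intro bks hlen; exact hlen
  | cons day td ih => intro bks hlen; exact ih _ (by simp [hlen])

lemma ToDays_alt_eq_flatMap (tradingDays : List Int) (params : List (List (String × Int))) :
    ToDays_alt tradingDays params = params.flatMap (fun p => pvFilt tradingDays (pvBounds tradingDays p)) := by
  unfold ToDays_alt
  rw [PySem.List.foldl_append_singleton_eq_map]
  simp only [List.nil_append]
  set bounds := params.map (pvBounds tradingDays) with hb
  have hlen : (bounds.map (fun _ => ([] : List Int))).length = bounds.length := by simp
  have hres := foldl_len tradingDays bounds _ hlen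
  set res := tradingDays.foldl (fun bks day =>
        (bks.zip bounds).map (fun p => if p.2.1 ≤ day ∧ day ≤ p.2.2 then p.1 ++ [day] else p.1))
      (bounds.map (fun _ => ([] : List Int))) with hr
  have hzip : res.zip bounds = bounds.map (fun b => (pvFilt tradingDays b, b)) := by
    rw [hr, foldl_zip_bridge tradingDays bounds _ hlen, foldl_step'_eq]
    have : (bounds.map (fun _ => ([] : List Int))).zip bounds
        = bounds.map (fun b => (([] : List Int), b)) := by
      have h2 := @List.zip_map' (Int × Int) (List Int) (Int × Int)
        (fun _ => ([] : List Int)) id bounds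
      simpa using h2
    rw [this]; simp
  have hres' : res = bounds.map (fun b => pvFilt tradingDays b) := by
    have : res = (res.zip bounds).map (·.1) :=
      (List.map_fst_zip (l₁ := res) (l₂ := bounds) (le_of_eq hres)).symm
    rw [this, hzip]; simp
  rw [PySem.List.foldl_append_eq_flatten, hres', hb]
  simp [List.flatten_eq_flatMap, List.flatMap_map]

-- ===== VERDICT (by name: the statement is the Claim_ definition above) =====
theorem ToDays_spec : Claim_equal_ToDays := by
  intro tradingDays params _ _
  unfold Spec_ToDays
  rw [ToDays_eq_flatMap, ToDays_alt_eq_flatMap]
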